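-- pv_equiv track=rewrite | github.com/dariomx/topcoder-srm | leetcode/trd-pass/medium/sequence-reconstruction/sequence-reconstruction-toposort.py | getRelation
-- ===== SOURCE A (Python) =====
-- def getRelation(seqs, refRel, n):
--     rel = set()
--     for seq in seqs:
--         m = len(seq)
--         for i in range(m):
--             x = seq[i]
--             if not (1 <= x <= n):  # note sure about this
--                 return None
--             for j in range(i + 1, m):
--                 y = seq[j]
--                 if x == y or \
--                    (y, x) in rel or \
--                    (refRel and (x, y) not in refRel):
--                     return None
--                 rel.add((x, y))
--     return rel
-- ===== SOURCE B (Python) =====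
-- def _pairs(seq):
--     # ordered pairs (earlier, later) of one sequence, by recursion on the tail
--     if len(seq) <= 1:
--         return []
--     x, rest = seq[0], seq[1:]
--     return [(x, y) for y in rest] + _pairs(rest)
--
--
-- def getRelation(seqs, refRel, n):
--     # reject any element outside [1, n] up front
--     if any(x < 1 or x > n for seq in seqs for x in seq):
--         return None
--     rel = set()
--     for seq in seqs:
--         rel.update(_pairs(seq))
--     # validity by counting: collapsing every pair to its unordered form loses
--     # an element exactly when some pair and its reverse are both present;
--     # reflexive pairs are caught separately
--     if len({(min(x, y), max(x, y)) for (x, y) in rel}) != len(rel) \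
--        or any(x == y for (x, y) in rel):
--         return None
--     if refRel and not rel.issubset(refRel):
--         return None
--     return rel
-- ===== Notes on version B (the rewrite author's own statement) =====
-- stated objective: alternative
-- what changed: B separates enumeration from validation with a different mechanism: an up-front range pass, recursive per-sequence pair enumeration, antisymmetry/irreflexivity detected by comparing the cardinality of the min/max-canonicalised pair set against the relation's size (no reverse-pair membership queries at all), and refRel handled by one issubset test.
import Mathlib
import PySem

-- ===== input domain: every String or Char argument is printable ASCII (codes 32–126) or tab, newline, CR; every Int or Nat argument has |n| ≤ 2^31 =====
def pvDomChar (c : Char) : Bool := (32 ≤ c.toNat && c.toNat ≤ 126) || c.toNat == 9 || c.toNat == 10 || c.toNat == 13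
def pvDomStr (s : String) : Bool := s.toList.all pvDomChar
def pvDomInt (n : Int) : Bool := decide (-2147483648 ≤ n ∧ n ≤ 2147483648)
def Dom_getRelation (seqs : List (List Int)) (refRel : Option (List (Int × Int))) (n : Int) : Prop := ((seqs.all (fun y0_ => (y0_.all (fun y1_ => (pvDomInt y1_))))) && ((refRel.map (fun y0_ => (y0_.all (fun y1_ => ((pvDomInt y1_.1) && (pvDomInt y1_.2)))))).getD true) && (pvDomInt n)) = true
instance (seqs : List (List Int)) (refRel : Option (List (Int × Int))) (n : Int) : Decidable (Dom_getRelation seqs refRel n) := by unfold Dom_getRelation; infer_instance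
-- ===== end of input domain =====

-- B validates the finished relation by a counting argument (canonicalised pair set cardinality)
-- and a subset test instead of A's incremental membership checks (alternative decomposition; return values proved equal).

-- ===== PORT A =====
-- truthiness of `refRel` in `refRel and …` (None or [] is falsy)
def pyATruthy (refRel : Option (List (Int × Int))) : Bool :=
  match refRel with
  | some (_ :: _) => true
  | _ => false

-- inner `for j in range(i+1, m)` loop of A over the elements after x
def pyAInner (refRel : Option (List (Int × Int))) (x : Int)
    (rel : PySem.Set (Int × Int)) : List Int → Option (PySem.Set (Int × Int))
  | [] => some rel
  | y :: t =>
    if x == y || PySem.Set.contains rel (y, x) ||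
       (pyATruthy refRel && !((refRel.getD []).contains (x, y))) then none
    else pyAInner refRel x (PySem.Set.add rel (x, y)) t

-- `for i in range(m)` loop of A over one seq
def pyASeq (refRel : Option (List (Int × Int))) (n : Int)
    (rel : PySem.Set (Int × Int)) : List Int → Option (PySem.Set (Int × Int))
  | [] => some rel
  | x :: rest =>
    if ¬(1 ≤ x ∧ x ≤ n) then none
    else match pyAInner refRel x rel rest with
      | none => none
      | some rel' => pyASeq refRel n rel' rest

-- `for seq in seqs` loop of A
def pyAOuter (refRel : Option (List (Int × Int))) (n : Int)
    (rel : PySem.Set (Int × Int)) : List (List Int) → Option (PySem.Set (Int × Int))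
  | [] => some rel
  | s :: ss =>
    match pyASeq refRel n rel s with
    | none => none
    | some rel' => pyAOuter refRel n rel' ss

def getRelation (seqs : List (List Int)) (refRel : Option (List (Int × Int))) (n : Int) :
    Option (List (Int × Int)) :=
  pyAOuter refRel n PySem.Set.empty seqs

-- ===== PORT B =====
def pyBTruthy (refRel : Option (List (Int × Int))) : Bool :=
  match refRel with
  | some (_ :: _) => true
  | _ => false

-- helper `_pairs(seq)`: recursion on the tail
def pyBPairs : List Int → List (Int × Int)
  | [] => []
  | [_] => []
  | x :: rest => rest.map (fun y => (x, y)) ++ pyBPairs rest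

def getRelation_alt (seqs : List (List Int)) (refRel : Option (List (Int × Int))) (n : Int) :
    Option (List (Int × Int)) :=
  if seqs.any (fun s => s.any (fun x => decide (x < 1) || decide (n < x))) then none
  else
    let rel : PySem.Set (Int × Int) :=
      seqs.foldl (fun r s => PySem.Set.update r (pyBPairs s)) PySem.Set.empty
    if (PySem.Set.len (PySem.Set.ofList
          (rel.map (fun p => (min p.1 p.2, max p.1 p.2)))) != PySem.Set.len rel)
       || rel.any (fun p => p.1 == p.2) then none
    else if pyBTruthy refRel && !(PySem.Set.issubset rel (refRel.getD [])) then none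
    else some rel

-- ===== PRECONDITION & SPEC =====
def Spec_getRelation (seqs : List (List Int)) (refRel : Option (List (Int × Int))) (n : Int) (out : Option (List (Int × Int))) : Prop := out = getRelation_alt seqs refRel n
instance (seqs : List (List Int)) (refRel : Option (List (Int × Int))) (n : Int) (out : Option (List (Int × Int))) : Decidable (Spec_getRelation seqs refRel n out) := by unfold Spec_getRelation; infer_instance

-- ===== CLAIM (what is proved, stated in full; the proofs are below) =====
def Claim_equal_getRelation : Prop := ∀ (seqs : List (List Int)) (refRel : Option (List (Int × Int))) (n : Int), Dom_getRelation seqs refRel n → Spec_getRelation seqs refRel n (getRelation seqs refRel n)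

-- ===== LEMMAS AND PROOFS =====

-- the ordered pairs of one sequence, in A's traversal order
def pairsOf : List Int → List (Int × Int)
  | [] => []
  | x :: t => t.map (fun y => (x, y)) ++ pairsOf t

def allPairs (seqs : List (List Int)) : List (Int × Int) := seqs.flatMap pairsOf

-- A's pair check as a boolean sequential scan over a pair list
def chk (refRel : Option (List (Int × Int))) (rel : PySem.Set (Int × Int)) :
    List (Int × Int) → Bool
  | [] => true
  | (x, y) :: ps =>
    if x == y || PySem.Set.contains rel (y, x) ||
       (pyATruthy refRel && !((refRel.getD []).contains (x, y))) then false
    else chk refRel (PySem.Set.add rel (x, y)) ps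

-- the reverse-pair part of the scan alone
def noRev (rel : PySem.Set (Int × Int)) : List (Int × Int) → Bool
  | [] => true
  | (x, y) :: ps =>
    !(PySem.Set.contains rel (y, x)) && noRev (PySem.Set.add rel (x, y)) ps

theorem chk_append (refRel : Option (List (Int × Int))) (ps qs : List (Int × Int)) :
    ∀ rel, chk refRel rel (ps ++ qs) =
      (chk refRel rel ps && chk refRel (PySem.Set.update rel ps) qs) := by
  induction ps with
  | nil => intro rel; simp [chk, PySem.Set.update]
  | cons p t ih =>
    intro rel
    obtain ⟨x, y⟩ := p
    simp only [List.cons_append, chk]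
    split
    · simp
    · rw [ih]
      rfl

theorem chk_split (refRel : Option (List (Int × Int))) (ps : List (Int × Int)) :
    ∀ rel, chk refRel rel ps =
      ((ps.all fun p => !(p.1 == p.2) &&
          !(pyATruthy refRel && !((refRel.getD []).contains p))) && noRev rel ps) := by
  induction ps with
  | nil => intro rel; simp [chk, noRev]
  | cons p t ih =>
    intro rel
    obtain ⟨x, y⟩ := p
    simp only [chk, noRev, List.all_cons]
    rw [ih]
    by_cases h1 : x = y <;>
      by_cases h2 : PySem.Set.contains rel (y, x) = true <;>
        by_cases h3 : (pyATruthy refRel && !((refRel.getD []).contains (x, y))) = true <;>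
          simp [h1, Bool.and_comm, Bool.and_left_comm, Bool.and_assoc]

theorem pyAInner_eq (refRel : Option (List (Int × Int))) (x : Int) (t : List Int) :
    ∀ rel, pyAInner refRel x rel t =
      if chk refRel rel (t.map (fun y => (x, y))) then
        some (PySem.Set.update rel (t.map (fun y => (x, y)))) else none := by
  induction t with
  | nil => intro rel; simp [pyAInner, chk, PySem.Set.update]
  | cons y t ih =>
    intro rel
    simp only [pyAInner, List.map_cons, chk]
    split
    · simp
    · rw [ih]
      rfl

theorem pyASeq_eq (refRel : Option (List (Int × Int))) (n : Int) (s : List Int) :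
    ∀ rel, pyASeq refRel n rel s =
      if (s.all fun x => decide (1 ≤ x ∧ x ≤ n)) && chk refRel rel (pairsOf s) then
        some (PySem.Set.update rel (pairsOf s)) else none := by
  induction s with
  | nil => intro rel; simp [pyASeq, chk, pairsOf, PySem.Set.update]
  | cons x rest ih =>
    intro rel
    simp only [pyASeq, List.all_cons, pairsOf]
    by_cases hx : 1 ≤ x ∧ x ≤ n
    · rw [if_neg (by simpa using hx), pyAInner_eq, chk_append]
      by_cases hc : chk refRel rel (rest.map fun y => (x, y)) = true
      · rw [if_pos hc]
        show pyASeq refRel n (PySem.Set.update rel (rest.map fun y => (x, y))) rest = _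
        rw [ih]
        simp [hx, hc, PySem.Set.update, List.foldl_append]
      · rw [if_neg hc]
        simp [hc]
    · rw [if_pos (by simpa using hx)]
      simp [hx]

theorem pyAOuter_eq (refRel : Option (List (Int × Int))) (n : Int) (seqs : List (List Int)) :
    ∀ rel, pyAOuter refRel n rel seqs =
      if (seqs.all fun s => s.all fun x => decide (1 ≤ x ∧ x ≤ n)) &&
         chk refRel rel (allPairs seqs) then
        some (PySem.Set.update rel (allPairs seqs)) else none := by
  induction seqs with
  | nil => intro rel; simp [pyAOuter, allPairs, chk, PySem.Set.update]
  | cons s ss ih =>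
    intro rel
    have hall : allPairs (s :: ss) = pairsOf s ++ allPairs ss := by
      simp [allPairs]
    simp only [pyAOuter, List.all_cons, hall]
    rw [pyASeq_eq, chk_append]
    by_cases h1 : (s.all fun x => decide (1 ≤ x ∧ x ≤ n)) = true
    · by_cases h2 : chk refRel rel (pairsOf s) = true
      · rw [if_pos (by rw [h1, h2]; rfl)]
        show pyAOuter refRel n (PySem.Set.update rel (pairsOf s)) ss = _
        rw [ih, h1, h2]
        simp only [Bool.true_and, PySem.Set.update, List.foldl_append]
      · have hf2 : chk refRel rel (pairsOf s) = false := by simpa using h2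
        rw [if_neg (by rw [hf2]; simp), if_neg (by rw [hf2]; simp)]
    · have hf1 : (s.all fun x => decide (1 ≤ x ∧ x ≤ n)) = false := by simpa using h1
      rw [if_neg (by rw [hf1]; simp), if_neg (by rw [hf1]; simp)]

theorem pyBPairs_eq (s : List Int) : pyBPairs s = pairsOf s := by
  induction s with
  | nil => rfl
  | cons x t ih =>
    cases t with
    | nil => rfl
    | cons y u =>
      show (y :: u).map (fun z => (x, z)) ++ pyBPairs (y :: u) = _
      rw [ih]
      rfl

theorem bRel_eq (seqs : List (List Int)) :
    ∀ rel, seqs.foldl (fun r s => PySem.Set.update r (pyBPairs s)) rel =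
      PySem.Set.update rel (allPairs seqs) := by
  induction seqs with
  | nil => intro rel; simp [allPairs, PySem.Set.update]
  | cons s ss ih =>
    intro rel
    have hall : allPairs (s :: ss) = pairsOf s ++ allPairs ss := by simp [allPairs]
    simp only [List.foldl_cons]
    rw [pyBPairs_eq, ih, hall]
    simp [PySem.Set.update, List.foldl_append]

-- noRev forward direction: a completed clean scan means no reverse pair anywhere
theorem noRev_forall (ps : List (Int × Int)) :
    ∀ rel, noRev rel ps = true →
      ∀ p ∈ ps, p.1 ≠ p.2 → ((p.2, p.1) ∉ rel ∧ (p.2, p.1) ∉ ps) := by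
  induction ps with
  | nil => simp
  | cons q t ih =>
    intro rel h p hp hne
    obtain ⟨x, y⟩ := q
    simp only [noRev, Bool.and_eq_true, Bool.not_eq_true'] at h
    obtain ⟨h1, h2⟩ := h
    have hIH := ih (PySem.Set.add rel (x, y)) h2
    have hxy_mem : (x, y) ∈ PySem.Set.add rel (x, y) := by
      rw [PySem.Set.mem_add]; right; rfl
    rcases List.mem_cons.mp hp with hpq | hpt
    · subst hpq
      have hrel : (y, x) ∉ rel := by
        intro hmem
        exact absurd ((PySem.Set.contains_iff _ _).mpr hmem) (by simpa using h1)
      refine ⟨hrel, ?_⟩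
      intro hmem
      rcases List.mem_cons.mp hmem with he | ht
      · exact hne ((congrArg Prod.fst he).symm)
      · rcases hIH (y, x) ht (fun hc => hne hc.symm) with ⟨hc, _⟩
        exact hc hxy_mem
    · rcases hIH p hpt hne with ⟨hc1, hc2⟩
      refine ⟨fun hmem => hc1 (by rw [PySem.Set.mem_add]; left; exact hmem), ?_⟩
      intro hmem
      rcases List.mem_cons.mp hmem with he | ht
      · exact hc1 (he ▸ hxy_mem)
      · exact hc2 ht

-- noRev backward direction
theorem noRev_of_forall (ps : List (Int × Int)) :
    ∀ rel, (∀ p ∈ ps, (p.2, p.1) ∉ ps) → (∀ p ∈ ps, (p.2, p.1) ∉ rel) →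
      noRev rel ps = true := by
  induction ps with
  | nil => simp [noRev]
  | cons q t ih =>
    intro rel hps hrel
    obtain ⟨x, y⟩ := q
    simp only [noRev, Bool.and_eq_true, Bool.not_eq_true']
    constructor
    · have : (y, x) ∉ rel := hrel (x, y) (List.mem_cons_self)
      simp [PySem.Set.contains_eq_listContains]
      intro hmem
      exact this (by simpa using hmem)
    · apply ih
      · intro p hp hmem
        exact hps p (List.mem_cons_of_mem _ hp) (List.mem_cons_of_mem _ hmem)
      · intro p hp
        rw [PySem.Set.mem_add]
        rintro (hmem | he)
        · exact hrel p (List.mem_cons_of_mem _ hp) hmem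
        · have hp' : p = (y, x) := by
            have h1 : p.2 = x := congrArg Prod.fst he
            have h2 : p.1 = y := congrArg Prod.snd he
            exact Prod.ext h2 h1
          exact hps (x, y) (List.mem_cons_self) (by simpa [hp'] using List.mem_cons_of_mem (x,y) hp)

-- main bridge: sequential scan from the empty set = the three whole-set conditions
theorem chk_empty_iff (refRel : Option (List (Int × Int))) (ps : List (Int × Int)) :
    chk refRel PySem.Set.empty ps = true ↔
      ((∀ p ∈ ps, p.1 ≠ p.2) ∧ (∀ p ∈ ps, (p.2, p.1) ∉ ps) ∧
       (pyATruthy refRel = true → ∀ p ∈ ps, (refRel.getD []).contains p = true)) := by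
  rw [chk_split]
  simp only [Bool.and_eq_true, List.all_eq_true]
  constructor
  · rintro ⟨hlocal, hrev⟩
    have hne : ∀ p ∈ ps, p.1 ≠ p.2 := by
      intro p hp
      have := hlocal p hp
      simp only [Bool.not_eq_true', beq_eq_false_iff_ne] at this
      exact this.1
    refine ⟨hne, ?_, ?_⟩
    · intro p hp
      exact (noRev_forall ps PySem.Set.empty hrev p hp (hne p hp)).2
    · intro ht p hp
      have := hlocal p hp
      simp only [Bool.not_eq_true', Bool.and_eq_false_iff] at this
      rcases this.2 with h | h
      · exact absurd ht (by simp [h])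
      · simpa using h
  · rintro ⟨hne, hrev, href⟩
    constructor
    · intro p hp
      simp only [Bool.not_eq_true', beq_eq_false_iff_ne]
      refine ⟨hne p hp, ?_⟩
      cases ht : pyATruthy refRel with
      | false => simp
      | true => simpa using href ht p hp
    · exact noRev_of_forall ps PySem.Set.empty hrev (by simp [PySem.Set.empty])

-- dedup keeps the length exactly when the list already has no duplicates
theorem len_ofList_eq_iff {α : Type} [BEq α] [LawfulBEq α] (l : List α) :
    (PySem.Set.ofList l).length = l.length ↔ l.Nodup := by
  constructor
  · induction l with
    | nil => simp
    | cons x xs ih =>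
      intro h
      rw [PySem.Set.ofList_cons] at h
      simp only [List.length_cons] at h
      have hle : (PySem.Set.discard (PySem.Set.ofList xs) x).length ≤
          (PySem.Set.ofList xs).length := List.length_filter_le _ _
      have hle2 : (PySem.Set.ofList xs).length ≤ xs.length := PySem.Set.length_ofList_le xs
      have heq : (PySem.Set.discard (PySem.Set.ofList xs) x).length = xs.length := by omega
      have hxs : (PySem.Set.ofList xs).length = xs.length := by omega
      have hnd : xs.Nodup := ih hxs
      have hx : x ∉ xs := by
        intro hmem
        have hmem' : x ∈ PySem.Set.ofList xs := (PySem.Set.mem_ofList xs x).mpr hmem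
        have hlt : (PySem.Set.discard (PySem.Set.ofList xs) x).length <
            (PySem.Set.ofList xs).length := by
          apply List.length_filter_lt_length_iff_exists.mpr
          exact ⟨x, hmem', by simp⟩
        omega
      exact List.nodup_cons.mpr ⟨hx, hnd⟩
  · intro h
    rw [PySem.Set.ofList_eq_self_of_nodup l h]

theorem canon_eq_cases (p q : Int × Int)
    (h : ((min p.1 p.2, max p.1 p.2) : Int × Int) = (min q.1 q.2, max q.1 q.2)) :
    q = p ∨ q = (p.2, p.1) := by
  obtain ⟨a, b⟩ := p
  obtain ⟨c, d⟩ := q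
  have hf : min a b = min c d := congrArg Prod.fst h
  have hs : max a b = max c d := congrArg Prod.snd h
  simp only [Prod.mk.injEq]
  omega

-- B's counting check, on a duplicate-free pair list with no reflexive pair,
-- says exactly "no pair together with its reverse"
theorem count_check_iff (R : List (Int × Int)) (hnd : R.Nodup)
    (hirr : ∀ p ∈ R, p.1 ≠ p.2) :
    (PySem.Set.ofList (R.map (fun p => (min p.1 p.2, max p.1 p.2)))).length =
      R.length ↔ ∀ p ∈ R, (p.2, p.1) ∉ R := by
  have hlen : (R.map (fun p : Int × Int => (min p.1 p.2, max p.1 p.2))).length = R.length :=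
    List.length_map ..
  rw [← hlen, len_ofList_eq_iff]
  constructor
  · intro hmap p hp hrev
    have hinj := List.inj_on_of_nodup_map hmap
    have hpeq : p = ((p.2, p.1) : Int × Int) :=
      hinj hp hrev (by simp [min_comm, max_comm])
    exact hirr p hp (congrArg Prod.fst hpeq)
  · intro hrev
    apply List.Nodup.map_on _ hnd
    intro q hq r hr hc
    rcases canon_eq_cases q r hc with h | h
    · exact h.symm
    · have hmem : ((q.2, q.1) : Int × Int) ∈ R := by rw [← h]; exact hr
      exact absurd hmem (hrev q hq)

-- ===== VERDICT (by name: the statement is the Claim_ definition above) =====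
theorem getRelation_spec : Claim_equal_getRelation := by
  intro seqs refRel n _
  unfold Spec_getRelation getRelation getRelation_alt
  rw [pyAOuter_eq]
  have hrelB : seqs.foldl (fun r s => PySem.Set.update r (pyBPairs s)) PySem.Set.empty
      = PySem.Set.ofList (allPairs seqs) := by
    rw [bRel_eq, PySem.Set.ofList_eq_foldl]; rfl
  have hofl : PySem.Set.update (PySem.Set.empty : PySem.Set (Int × Int)) (allPairs seqs)
      = PySem.Set.ofList (allPairs seqs) := by
    rw [PySem.Set.ofList_eq_foldl]; rfl
  rw [hofl]
  simp only [hrelB]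
  set ps := allPairs seqs with hps
  set R := PySem.Set.ofList ps with hR
  have hmemR : ∀ p : Int × Int, p ∈ R ↔ p ∈ ps := fun p => PySem.Set.mem_ofList ps p
  have hndR : R.Nodup := PySem.Set.nodup_ofList ps
  -- the two range tests agree
  have hrange_eq : (seqs.any fun s => s.any fun x => decide (x < 1) || decide (n < x))
      = !(seqs.all fun s => s.all fun x => decide (1 ≤ x ∧ x ≤ n)) := by
    rw [Bool.eq_iff_iff]
    simp only [List.any_eq_true, Bool.or_eq_true, decide_eq_true_eq, Bool.not_eq_true,
      Bool.not_eq_true', List.all_eq_false]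
    constructor
    · rintro ⟨s, hs, x, hx, h⟩
      exact ⟨s, hs, x, hx, by omega⟩
    · rintro ⟨s, hs, x, hx, h⟩
      exact ⟨s, hs, x, hx, by omega⟩
  by_cases hrange : (seqs.all fun s => s.all fun x => decide (1 ≤ x ∧ x ≤ n)) = true
  · rw [hrange_eq, hrange]
    simp only [Bool.not_true, Bool.false_eq_true, if_false, Bool.true_and]
    -- B's three boolean checks
    set cCnt := ((PySem.Set.len (PySem.Set.ofList
          (R.map (fun p => (min p.1 p.2, max p.1 p.2)))) != PySem.Set.len R)
        || R.any fun p => p.1 == p.2) with hcCnt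
    set cRef := (pyBTruthy refRel && !(PySem.Set.issubset R (refRel.getD []))) with hcRef
    have bIrr : (∀ p ∈ ps, p.1 ≠ p.2) ↔ (R.any fun p => p.1 == p.2) = false := by
      simp only [List.any_eq_false, beq_iff_eq]
      constructor
      · intro h p hp; simpa using h p ((hmemR p).mp hp)
      · intro h p hp; simpa using h p ((hmemR p).mpr hp)
    have bRef : (pyATruthy refRel = true → ∀ p ∈ ps, (refRel.getD []).contains p = true) ↔
        cRef = false := by
      rw [hcRef]
      have htr : pyBTruthy refRel = pyATruthy refRel := rfl
      rw [htr]
      cases ht : pyATruthy refRel with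
      | false => simp
      | true =>
        simp only [Bool.true_and, Bool.not_eq_false', forall_const]
        constructor
        · intro h
          apply (PySem.Set.issubset_iff R (refRel.getD [])).mpr
          intro p hp
          have := h p ((hmemR p).mp hp)
          simpa using this
        · intro h p hp
          have := (PySem.Set.issubset_iff R (refRel.getD [])).mp h p ((hmemR p).mpr hp)
          simpa using this
    have key : chk refRel PySem.Set.empty ps = true ↔ (cCnt = false ∧ cRef = false) := by
      rw [chk_empty_iff]
      constructor
      · rintro ⟨h1, h2, h3⟩
        refine ⟨?_, bRef.mp h3⟩
        rw [hcCnt, Bool.or_eq_false_iff]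
        have hirrR : ∀ p ∈ R, p.1 ≠ p.2 := fun p hp => h1 p ((hmemR p).mp hp)
        have hrevR : ∀ p ∈ R, (p.2, p.1) ∉ R := by
          intro p hp hmem
          exact h2 p ((hmemR p).mp hp) ((hmemR _).mp hmem)
        refine ⟨?_, bIrr.mp h1⟩
        have := (count_check_iff R hndR hirrR).mpr hrevR
        simp only [PySem.Set.len, bne_eq_false_iff_eq]
        exact_mod_cast this
      · rintro ⟨h1, h2⟩
        rw [hcCnt, Bool.or_eq_false_iff] at h1
        obtain ⟨hlen, hirrB⟩ := h1
        have h1' : ∀ p ∈ ps, p.1 ≠ p.2 := bIrr.mpr hirrB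
        have hirrR : ∀ p ∈ R, p.1 ≠ p.2 := fun p hp => h1' p ((hmemR p).mp hp)
        have hlen' : (PySem.Set.ofList (R.map (fun p => (min p.1 p.2, max p.1 p.2)))).length
            = R.length := by
          simp only [PySem.Set.len, bne_eq_false_iff_eq] at hlen
          exact_mod_cast hlen
        have hrevR := (count_check_iff R hndR hirrR).mp hlen'
        refine ⟨h1', ?_, bRef.mpr h2⟩
        intro p hp hmem
        exact hrevR p ((hmemR p).mpr hp) ((hmemR _).mpr hmem)
    by_cases hchk : chk refRel PySem.Set.empty ps = true
    · rw [if_pos hchk]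
      obtain ⟨h1, h2⟩ := key.mp hchk
      rw [h1, h2]
      rfl
    · rw [if_neg hchk]
      cases h1v : cCnt with
      | true => rfl
      | false =>
        cases h2v : cRef with
        | true => rfl
        | false => exact absurd (key.mpr ⟨h1v, h2v⟩) hchk
  · have hf : (seqs.all fun s => s.all fun x => decide (1 ≤ x ∧ x ≤ n)) = false := by
      simpa using hrange
    rw [hrange_eq, hf, if_neg (by simp)]
    simp
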